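-- pv_equiv track=rewrite | github.com/miselico/relational-gcn | rgcn/layers/graph.2.py | _partitionDims
-- ===== SOURCE A (Python) =====
-- from itertools import accumulate
--
-- def _partitionDims(num_elements):
--     '''returns 2**n sized partitions of the elements'''
--     partitions = []
--     num_elements_rest = num_elements
--     while num_elements_rest != 0:
--         partitions.append(num_elements_rest%2)
--         num_elements_rest = num_elements_rest // 2
--     counters = [2**index for (index, val) in enumerate(partitions) if val != 0]
--     counters.reverse()
--     assert num_elements == sum(counters)
--     partition_ends = list(accumulate(counters))
--     starts = [0]
--     starts.extend(partition_ends[:-1])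
--     partitions = [(start, nextStart) for (start, nextStart) in  zip(starts,  partition_ends)]
--     return partitions
-- ===== SOURCE B (Python) =====
-- def _partitionDims(num_elements):
--     '''returns 2**n sized partitions of the elements'''
--     parts = []
--     start = 0
--     n = num_elements
--     while n > 0:
--         p = 1 << (n.bit_length() - 1)
--         parts.append((start, start + p))
--         start += p
--         n -= p
--     return parts
-- ===== Notes on version B (the rewrite author's own statement) =====
-- stated objective: simpler
-- what changed: Greedy MSB-first loop: repeatedly split off the largest power of two (via bit_length) while accumulating the running start, replacing A's LSB bit-list construction, reverse, and accumulate/zip scaffolding.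
import Mathlib
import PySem

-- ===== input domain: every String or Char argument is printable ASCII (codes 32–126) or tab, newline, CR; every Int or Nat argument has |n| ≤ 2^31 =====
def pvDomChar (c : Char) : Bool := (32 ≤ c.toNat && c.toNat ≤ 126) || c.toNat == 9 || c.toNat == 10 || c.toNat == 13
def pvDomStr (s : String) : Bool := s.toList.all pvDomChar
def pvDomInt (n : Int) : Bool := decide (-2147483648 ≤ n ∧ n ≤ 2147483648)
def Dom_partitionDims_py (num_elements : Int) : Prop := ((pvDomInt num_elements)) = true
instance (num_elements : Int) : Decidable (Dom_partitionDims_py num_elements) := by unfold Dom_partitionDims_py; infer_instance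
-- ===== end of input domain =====

-- B replaces A's LSB bit-list + reverse + accumulate/zip pipeline by a single greedy
-- MSB-first loop peeling off the largest power of two; return values agree on 0 ≤ n.

-- ===== PORT A =====
-- the 'while num_elements_rest != 0' loop collecting num_elements_rest % 2;
-- fuel 64 covers every |n| ≤ 2^31 (the loop runs at most 32 times there)
def pvBitsLoop : Nat → Int → List Int
  | 0, _ => []
  | fuel + 1, rest =>
      if rest ≠ 0 then PySem.Int.mod rest 2 :: pvBitsLoop fuel (PySem.Int.floordiv rest 2)
      else []

-- itertools.accumulate (running sums, first partial sum = first element; s is the running sum)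
def pvAccumulate : Int → List Int → List Int
  | _, [] => []
  | s, c :: cs => (s + c) :: pvAccumulate (s + c) cs

def partitionDims_py (num_elements : Int) : List (Int × Int) :=
  let partitions := pvBitsLoop 64 num_elements
  -- [2**index for (index, val) in enumerate(partitions) if val != 0]; indices are ≥ 0, so 2**index = 2 ^ index.toNat
  let counters := ((PySem.List.enumerate partitions 0).filter (fun iv => iv.2 != 0)).map
      (fun iv => (2 : Int) ^ iv.1.toNat)
  let counters := counters.reverse
  -- assert num_elements == sum(counters): holds on every input admitted by Pre_
  let partition_ends := pvAccumulate 0 counters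
  let starts := 0 :: PySem.List.slice partition_ends none (some (-1))  -- starts = [0]; starts.extend(partition_ends[:-1])
  starts.zip partition_ends

-- ===== PORT B =====
-- while n > 0: p = 1 << (n.bit_length() - 1); append (start, start+p); start += p; n -= p
def pvAltLoop : Nat → Int → Int → List (Int × Int)
  | 0, _, _ => []
  | fuel + 1, start, n =>
      if n > 0 then
        let p : Int := 2 ^ (PySem.Int.bitLength n - 1)
        (start, start + p) :: pvAltLoop fuel (start + p) (n - p)
      else []

def partitionDims_py_alt (num_elements : Int) : List (Int × Int) :=
  pvAltLoop 64 0 num_elements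

-- ===== PRECONDITION & SPEC =====
-- A never returns on negative inputs: its while-loop stalls (−1 % 2 = 1, −1 // 2 = −1 forever),
-- so Pre_ admits exactly the nonnegative integers, where A returns normally.
def Pre_partitionDims_py (num_elements : Int) : Prop := 0 ≤ num_elements
instance (num_elements : Int) : Decidable (Pre_partitionDims_py num_elements) := by
  unfold Pre_partitionDims_py; infer_instance

def pvWitness_partitionDims_py : Int := 13

def Spec_partitionDims_py (num_elements : Int) (out : List (Int × Int)) : Prop := out = partitionDims_py_alt num_elements
instance (num_elements : Int) (out : List (Int × Int)) : Decidable (Spec_partitionDims_py num_elements out) := by unfold Spec_partitionDims_py; infer_instance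

-- ===== CLAIM (what is proved, stated in full; the proofs are below) =====
def Claim_equal_partitionDims_py : Prop := ∀ (num_elements : Int), Dom_partitionDims_py num_elements → Pre_partitionDims_py num_elements → Spec_partitionDims_py num_elements (partitionDims_py num_elements)

-- ===== LEMMAS AND PROOFS =====

-- binary digits of m, least significant first (Nat-level mirror of A's while loop)
def pvNbits (m : Nat) : List Nat :=
  if h : m = 0 then [] else m % 2 :: pvNbits (m / 2)
decreasing_by exact Nat.div_lt_self (Nat.pos_of_ne_zero h) one_lt_two

-- the increasing list of powers of two named by the set bits of m
def pvPw (m : Nat) : List Int :=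
  if h : m = 0 then [] else
    (if m % 2 = 1 then [(1 : Int)] else []) ++ (pvPw (m / 2)).map (2 * ·)
decreasing_by exact Nat.div_lt_self (Nat.pos_of_ne_zero h) one_lt_two

-- A's list comprehension with the enumeration index generalized to start at i
def pvPowsI : List Int → Nat → List Int
  | [], _ => []
  | b :: bs, i => (if b ≠ 0 then [(2 : Int) ^ i] else []) ++ pvPowsI bs (i + 1)

-- intervals (s, s+c₁), (s+c₁, s+c₁+c₂), … : the common shape of both outputs
def pvIvls : Int → List Int → List (Int × Int)
  | _, [] => []
  | s, c :: cs => (s, s + c) :: pvIvls (s + c) cs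

theorem pvBitsLoop_eq (fuel : Nat) : ∀ m : Nat, m < 2 ^ fuel →
    pvBitsLoop fuel (m : Int) = (pvNbits m).map Int.ofNat := by
  induction fuel with
  | zero => intro m hm; interval_cases m; simp [pvBitsLoop, pvNbits]
  | succ fuel ih =>
    intro m hm
    by_cases h : m = 0
    · subst h; simp [pvBitsLoop, pvNbits]
    · rw [pvBitsLoop, pvNbits]
      have hne : (m : Int) ≠ 0 := by exact_mod_cast h
      have hmod : PySem.Int.mod (m : Int) 2 = ((m % 2 : Nat) : Int) := by
        rw [PySem.Int.mod_eq_emod_of_pos (by omega : (0:Int) < 2)]; omega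
      have hdiv : PySem.Int.floordiv (m : Int) 2 = ((m / 2 : Nat) : Int) := by
        rw [PySem.Int.floordiv_eq_ediv_of_pos (by omega : (0:Int) < 2)]; omega
      rw [if_pos hne, dif_neg h, hmod, hdiv, ih (m / 2) (by omega)]
      rfl

theorem pvPowsI_shift (bs : List Int) : ∀ i : Nat,
    pvPowsI bs (i + 1) = (pvPowsI bs i).map (2 * ·) := by
  induction bs with
  | nil => intro i; simp [pvPowsI]
  | cons b bs ih =>
    intro i
    simp only [pvPowsI, List.map_append, ih (i + 1)]
    congr 1
    by_cases hb : b = 0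
    · simp [hb]
    · simp [hb, pow_succ]; ring

theorem pvEnum_filter_eq (l : List Int) : ∀ s : Nat,
    (((PySem.List.enumerate l (s : Int)).filter (fun iv => iv.2 != 0)).map
      (fun iv => (2 : Int) ^ iv.1.toNat)) = pvPowsI l s := by
  induction l with
  | nil => intro s; simp [PySem.List.enumerate_nil, pvPowsI]
  | cons b bs ih =>
    intro s
    rw [PySem.List.enumerate_cons]
    have : (s : Int) + 1 = ((s + 1 : Nat) : Int) := by push_cast; ring
    have ih' := ih (s + 1)
    push_cast at ih'
    by_cases hb : b = 0
    · simp [hb, pvPowsI, ih']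
    · simp [hb, pvPowsI, ih']

theorem pvPowsI_nbits (m : Nat) : pvPowsI ((pvNbits m).map Int.ofNat) 0 = pvPw m := by
  induction m using Nat.strong_induction_on with
  | _ m ih =>
    by_cases h : m = 0
    · subst h; simp [pvNbits, pvPw, pvPowsI]
    · rw [pvNbits, pvPw]
      simp only [dif_neg h, List.map_cons, pvPowsI, pvPowsI_shift,
        ih (m / 2) (Nat.div_lt_self (Nat.pos_of_ne_zero h) one_lt_two)]
      congr 1
      rcases Nat.mod_two_eq_zero_or_one m with h2 | h2 <;> simp [h2]

-- the greedy step: the set-bit powers of m are those of m − 2^(bitlen−1) plus the top power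
theorem pvPw_greedy (m : Nat) (hm : 0 < m) :
    pvPw m = pvPw (m - 2 ^ (PySem.Int.bitLength (m : Int) - 1)) ++
      [(2 : Int) ^ (PySem.Int.bitLength (m : Int) - 1)] := by
  induction m using Nat.strong_induction_on with
  | _ m ih =>
    by_cases h1 : m = 1
    · subst h1
      have hz0 : pvPw 0 = [] := by rw [pvPw]; simp
      have hb1 : PySem.Int.bitLength ((1 : Nat) : Int) - 1 = 0 := by decide
      rw [hb1, pvPw]
      norm_num [hz0]
    · have hm2 : 2 ≤ m := by omega
      have hhalf : 0 < m / 2 := Nat.div_pos (by omega) (by omega)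
      have hbl : PySem.Int.bitLength (m : Int) = PySem.Int.bitLength ((m / 2 : Nat) : Int) + 1 :=
        PySem.Int.bitLength_natCast (by omega)
      have hbl2 : 0 < PySem.Int.bitLength ((m / 2 : Nat) : Int) := by
        rw [PySem.Int.bitLength_natCast hhalf]; omega
      set k' : Nat := PySem.Int.bitLength ((m / 2 : Nat) : Int) - 1 with hk'
      have hk : PySem.Int.bitLength (m : Int) - 1 = k' + 1 := by omega
      have hle' : 2 ^ k' ≤ m / 2 := by
        have := PySem.Int.two_pow_bitLength_le ((m / 2 : Nat) : Int) (by exact_mod_cast hhalf.ne')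
        simpa [Int.natAbs_natCast] using this
      have hlt' : m / 2 < 2 ^ (k' + 1) := by
        have h2 : (m / 2 : Nat) < 2 ^ PySem.Int.bitLength ((m / 2 : Nat) : Int) := by
          simpa [Int.natAbs_natCast] using
            PySem.Int.lt_two_pow_bitLength ((m / 2 : Nat) : Int)
        have he : PySem.Int.bitLength ((m / 2 : Nat) : Int) = k' + 1 := by omega
        rwa [he] at h2
      have ihh := ih (m / 2) (Nat.div_lt_self (by omega) one_lt_two) hhalf
      rw [← hk'] at ihh
      have hpow : ((2 : Int) * 2 ^ k') = 2 ^ (k' + 1) := by ring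
      rw [hk, pvPw, dif_neg (by omega : ¬ m = 0), ihh]
      by_cases hz : m - 2 ^ (k' + 1) = 0
      · have hmeq : m = 2 ^ (k' + 1) := by
          have h2k : 2 ^ (k' + 1) = 2 * 2 ^ k' := by ring
          omega
        have heven : m % 2 = 0 := by
          rw [hmeq]; simp [pow_succ, Nat.mul_mod_left]
        have hhz : m / 2 - 2 ^ k' = 0 := by omega
        have hz0 : pvPw 0 = [] := by rw [pvPw]; simp
        rw [hz, hhz, heven, hz0]
        simp [hpow]
      · have hmod : (m - 2 ^ (k' + 1)) % 2 = m % 2 := by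
          have h2k : 2 ^ (k' + 1) = 2 * 2 ^ k' := by ring
          omega
        have hdiv : (m - 2 ^ (k' + 1)) / 2 = m / 2 - 2 ^ k' := by
          have h2k : 2 ^ (k' + 1) = 2 * 2 ^ k' := by ring
          omega
        rw [show pvPw (m - 2 ^ (k' + 1)) =
            (if (m - 2 ^ (k' + 1)) % 2 = 1 then [(1 : Int)] else []) ++
              (pvPw ((m - 2 ^ (k' + 1)) / 2)).map (2 * ·) by rw [pvPw, dif_neg hz]]
        rw [hmod, hdiv]
        simp [List.map_append, List.append_assoc, hpow]

theorem pvZipAcc (cs : List Int) : ∀ s : Int,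
    ((s :: (pvAccumulate s cs).dropLast).zip (pvAccumulate s cs)) = pvIvls s cs := by
  induction cs with
  | nil => intro s; simp [pvAccumulate, pvIvls]
  | cons c cs ih =>
    intro s
    cases cs with
    | nil => simp [pvAccumulate, pvIvls]
    | cons c' cs' =>
      have hne : pvAccumulate (s + c) (c' :: cs') ≠ [] := by simp [pvAccumulate]
      rw [pvAccumulate, List.dropLast_cons_of_ne_nil hne, List.zip_cons_cons, ih (s + c)]
      rfl

theorem pvAltLoop_eq (fuel : Nat) : ∀ (m : Nat) (s : Int), m < 2 ^ fuel →
    pvAltLoop fuel s (m : Int) = pvIvls s ((pvPw m).reverse) := by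
  induction fuel with
  | zero =>
    intro m s hm
    interval_cases m
    rw [pvAltLoop, pvPw]
    simp [pvIvls]
  | succ fuel ih =>
    intro m s hm
    by_cases h : m = 0
    · subst h
      rw [pvAltLoop, pvPw]
      simp [pvIvls]
    · have hpos : (0 : Int) < (m : Int) := by exact_mod_cast Nat.pos_of_ne_zero h
      rw [pvAltLoop]
      simp only [hpos, if_pos]
      set k : Nat := PySem.Int.bitLength (m : Int) - 1 with hk
      have hle : 2 ^ k ≤ m := by
        have := PySem.Int.two_pow_bitLength_le (m : Int) (by exact_mod_cast h)
        simpa [hk, Int.natAbs_natCast] using this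
      have hlt : m < 2 ^ (k + 1) := by
        have h2 : m < 2 ^ PySem.Int.bitLength (m : Int) := by
          simpa [Int.natAbs_natCast] using PySem.Int.lt_two_pow_bitLength (m : Int)
        have hbl : 0 < PySem.Int.bitLength (m : Int) := by
          rcases Nat.eq_zero_or_pos (PySem.Int.bitLength (m : Int)) with h0 | h0
          · rw [h0, pow_zero] at h2; omega
          · exact h0
        have he : PySem.Int.bitLength (m : Int) = k + 1 := by omega
        rwa [he] at h2
      have hcast : (2 : Int) ^ k = ((2 ^ k : Nat) : Int) := by push_cast; ring
      have hsub : (m : Int) - (2 : Int) ^ k = ((m - 2 ^ k : Nat) : Int) := by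
        rw [hcast]; omega
      have hkfuel : 2 ^ k ≤ 2 ^ fuel := by
        apply Nat.pow_le_pow_right (by omega)
        by_contra hc
        have : 2 ^ (fuel + 1) ≤ 2 ^ k := Nat.pow_le_pow_right (by omega) (by omega)
        omega
      have hrec := ih (m - 2 ^ k) (s + 2 ^ k) (by omega)
      rw [hsub, hrec, pvPw_greedy m (Nat.pos_of_ne_zero h), ← hk]
      simp [pvIvls]

theorem pvPortA_eq (m : Nat) (hm : m < 2 ^ 64) :
    partitionDims_py (m : Int) = pvIvls 0 ((pvPw m).reverse) := by
  have h1 : pvBitsLoop 64 (m : Int) = (pvNbits m).map Int.ofNat := pvBitsLoop_eq 64 m hm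
  have h2 := pvEnum_filter_eq ((pvNbits m).map Int.ofNat) 0
  simp only [Nat.cast_zero] at h2
  have h3 := pvPowsI_nbits m
  have hneg : PySem.List.slice (pvAccumulate 0 ((pvPw m).reverse)) none (some (-1)) =
      (pvAccumulate 0 ((pvPw m).reverse)).dropLast := by
    have := PySem.List.slice_to_neg_natCast (pvAccumulate 0 ((pvPw m).reverse)) (k := 1) (by omega)
    simpa [List.dropLast_eq_take] using this
  simp only [partitionDims_py, h1, h2, h3, hneg]
  rw [pvZipAcc]

-- ===== VERDICT (by name: the statement is the Claim_ definition above) =====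
theorem partitionDims_py_spec : Claim_equal_partitionDims_py := by
  intro n hDom hPre
  unfold Spec_partitionDims_py partitionDims_py_alt
  have hn : n = ((n.toNat : Nat) : Int) := by
    unfold Pre_partitionDims_py at hPre; omega
  have hb : n.toNat < 2 ^ 64 := by
    unfold Dom_partitionDims_py pvDomInt at hDom
    simp only [decide_eq_true_eq] at hDom
    omega
  rw [hn, pvPortA_eq n.toNat hb, pvAltLoop_eq 64 n.toNat 0 hb]
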